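-- pv_equiv track=rewrite | github.com/Teun2305/stupid_games | game.py | __has_winner
-- ===== SOURCE A (Python) =====
-- GAME_N = 3  # Amount of squares in a line needed to win
--
-- def __has_winner(array, player):
--     """
--     counts the amount of consecutive squares a player
--     has in an input list
--
--     Parameters
--     ----------
--     array : list
--         1-D list consisting of zeroes and PlayerInterfaces
--     player : PlayerInterface
--         the player for who to check
--
--     Returns
--     -------
--     bool
--         player has a GAME_N amount of consecutive squares
--
--     """
--     counter = 0
--     for element in array:
--         if element == player:
--             counter += 1
--         else:
--             counter = 0
--         if counter == GAME_N:
--             return True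
--     return False
-- ===== SOURCE B (Python) =====
-- GAME_N = 3  # Amount of squares in a line needed to win
--
--
-- def __has_winner(array, player):
--     # Phase 1: split the array into maximal runs of equal adjacent
--     # elements, newest run first: runs[0] is the run currently growing.
--     runs = []
--     for x in array:
--         if runs and runs[0][0] == x:
--             runs[0] = (x, runs[0][1] + 1)
--         else:
--             runs = [(x, 1)] + runs
--     # Phase 2: the player wins iff some run of theirs is long enough.
--     return any(k == player and n >= GAME_N for k, n in runs)
-- ===== Notes on version B (the rewrite author's own statement) =====
-- stated objective: alternative
-- what changed: Replaces the running reset-counter with early return by a two-phase pass: first decompose the array into maximal runs of equal adjacent elements (newest run first), then scan the runs for a player run of length >= GAME_N.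
import Mathlib
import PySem

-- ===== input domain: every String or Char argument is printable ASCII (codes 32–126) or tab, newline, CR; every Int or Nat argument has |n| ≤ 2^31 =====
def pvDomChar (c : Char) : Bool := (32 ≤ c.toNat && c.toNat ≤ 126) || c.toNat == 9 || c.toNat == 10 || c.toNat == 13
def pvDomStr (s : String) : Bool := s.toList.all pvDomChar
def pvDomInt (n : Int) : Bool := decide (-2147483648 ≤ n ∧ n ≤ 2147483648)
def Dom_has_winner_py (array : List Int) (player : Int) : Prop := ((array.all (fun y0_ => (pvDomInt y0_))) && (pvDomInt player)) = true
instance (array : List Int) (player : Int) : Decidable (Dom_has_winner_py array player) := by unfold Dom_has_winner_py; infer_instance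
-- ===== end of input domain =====

-- B replaces A's running reset-counter (with early return) by a two-phase pass:
-- build maximal runs of equal adjacent elements, then scan the runs (alternative decomposition).


-- ===== PORT A =====
-- A's loop: counter increments on player cells, resets otherwise, early-returns at GAME_N = 3.
def hasWinnerGo (player : Int) (xs : List Int) (counter : Int) : Bool :=
  match xs with
  | [] => false
  | x :: rest =>
    let c := if x = player then counter + 1 else 0
    if c = 3 then true else hasWinnerGo player rest c

def has_winner_py (array : List Int) (player : Int) : Bool :=
  hasWinnerGo player array 0

-- ===== PORT B =====
-- one step of B's run-building loop: grow the newest run or start a new one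
def runStep (acc : List (Int × Int)) (x : Int) : List (Int × Int) :=
  match acc with
  | (k, n) :: rest => if k = x then (x, n + 1) :: rest else (x, 1) :: (k, n) :: rest
  | [] => [(x, 1)]

def has_winner_py_alt (array : List Int) (player : Int) : Bool :=
  (array.foldl runStep []).any (fun p => decide (p.1 = player ∧ 3 ≤ p.2))

-- ===== PRECONDITION & SPEC =====
def Spec_has_winner_py (array : List Int) (player : Int) (out : Bool) : Prop := out = has_winner_py_alt array player
instance (array : List Int) (player : Int) (out : Bool) : Decidable (Spec_has_winner_py array player out) := by unfold Spec_has_winner_py; infer_instance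

-- ===== CLAIM (what is proved, stated in full; the proofs are below) =====
def Claim_equal_has_winner_py : Prop := ∀ (array : List Int) (player : Int), Dom_has_winner_py array player → Spec_has_winner_py array player (has_winner_py array player)

-- ===== LEMMAS AND PROOFS =====

-- invariant linking A's counter with B's run accumulator while A has not returned:
-- no finished or current run is already a winning run, the counter is below 3, and
-- the counter equals the length of the newest run when that run belongs to player.
def RunInv (player : Int) (acc : List (Int × Int)) (c : Int) : Prop :=
  (∀ p ∈ acc, ¬(p.1 = player ∧ 3 ≤ p.2)) ∧ c < 3 ∧
    (match acc with
     | [] => c = 0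
     | (k, n) :: _ => c = if k = player then n else 0)

-- once some run wins, B's fold keeps a winning run
theorem any_runStep_mono (player x : Int) (acc : List (Int × Int))
    (h : acc.any (fun p => decide (p.1 = player ∧ 3 ≤ p.2)) = true) :
    (runStep acc x).any (fun p => decide (p.1 = player ∧ 3 ≤ p.2)) = true := by
  match acc with
  | [] => simp at h
  | (k, n) :: rest =>
    simp only [runStep]
    split_ifs with hk
    · simp only [List.any_cons, Bool.or_eq_true, decide_eq_true_eq] at h ⊢
      rcases h with h | h
      · exact Or.inl ⟨hk ▸ h.1, by omega⟩
      · exact Or.inr h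
    · simp only [List.any_cons, Bool.or_eq_true] at h ⊢
      exact Or.inr h

theorem any_foldl_mono (player : Int) (xs : List Int) (acc : List (Int × Int))
    (h : acc.any (fun p => decide (p.1 = player ∧ 3 ≤ p.2)) = true) :
    (xs.foldl runStep acc).any (fun p => decide (p.1 = player ∧ 3 ≤ p.2)) = true := by
  induction xs generalizing acc with
  | nil => exact h
  | cons x xs ih => exact ih _ (any_runStep_mono player x acc h)

theorem go_eq_fold (player : Int) (xs : List Int) (acc : List (Int × Int)) (c : Int)
    (hinv : RunInv player acc c) :
    hasWinnerGo player xs c = (xs.foldl runStep acc).any (fun p => decide (p.1 = player ∧ 3 ≤ p.2)) := by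
  induction xs generalizing acc c with
  | nil =>
    obtain ⟨hall, -, -⟩ := hinv
    simp only [hasWinnerGo, List.foldl_nil]
    symm
    simp only [List.any_eq_false]
    intro p hp
    simp only [decide_eq_true_eq]
    exact hall p hp
  | cons x xs ih =>
    obtain ⟨hall, hc3, hhead⟩ := hinv
    simp only [hasWinnerGo, List.foldl_cons]
    by_cases hx : x = player
    · rw [if_pos hx]
      by_cases h3 : c + 1 = 3
      · rw [if_pos h3]
        symm
        apply any_foldl_mono
        have hc2 : c = 2 := by omega
        match acc, hhead with
        | [], hh =>
          have hh' : c = 0 := hh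
          omega
        | (k, n) :: rest, hh =>
          have hh' : c = if k = player then n else 0 := hh
          have hk : k = player := by
            by_contra hkp; rw [if_neg hkp] at hh'; omega
          have hn : n = 2 := by rw [if_pos hk] at hh'; omega
          have hkx : k = x := by rw [hk, hx]
          simp [runStep, hkx, hx, hn]
      · rw [if_neg h3]
        apply ih
        refine ⟨?_, by omega, ?_⟩
        · intro p hp
          match acc, hhead, hall with
          | [], hh, _ =>
            simp only [runStep, List.mem_singleton] at hp
            subst hp
            rintro ⟨-, h⟩; omega
          | (k, n) :: rest, hh, hall =>
            have hh' : c = if k = player then n else 0 := hh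
            simp only [runStep] at hp
            by_cases hk : k = x
            · rw [if_pos hk] at hp
              rcases List.mem_cons.mp hp with hp | hp
              · subst hp
                have hkp : k = player := by rw [hk, hx]
                rw [if_pos hkp] at hh'
                rintro ⟨-, h⟩
                simp only at h
                omega
              · exact hall _ (List.mem_cons_of_mem _ hp)
            · rw [if_neg hk] at hp
              rcases List.mem_cons.mp hp with hp | hp
              · subst hp
                rintro ⟨-, h⟩
                simp only at h
                omega
              · exact hall _ hp
        · match acc, hhead with
          | [], hh =>
            have hh' : c = 0 := hh
            show c + 1 = if x = player then (1 : Int) else 0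
            rw [if_pos hx]; omega
          | (k, n) :: rest, hh =>
            have hh' : c = if k = player then n else 0 := hh
            simp only [runStep]
            by_cases hk : k = x
            · rw [if_pos hk]
              have hkp : k = player := by rw [hk, hx]
              rw [if_pos hkp] at hh'
              show c + 1 = if x = player then n + 1 else 0
              rw [if_pos hx]; omega
            · rw [if_neg hk]
              have hkp : ¬ k = player := by rw [← hx]; exact hk
              rw [if_neg hkp] at hh'
              show c + 1 = if x = player then (1 : Int) else 0
              rw [if_pos hx]; omega
    · rw [if_neg hx]
      rw [if_neg (by omega : ¬(0 : Int) = 3)]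
      apply ih
      refine ⟨?_, by omega, ?_⟩
      · intro p hp
        match acc, hall with
        | [], _ =>
          simp only [runStep, List.mem_singleton] at hp
          subst hp
          rintro ⟨h, -⟩; exact hx h
        | (k, n) :: rest, hall =>
          simp only [runStep] at hp
          by_cases hk : k = x
          · rw [if_pos hk] at hp
            rcases List.mem_cons.mp hp with hp | hp
            · subst hp
              rintro ⟨h, -⟩; exact hx h
            · exact hall _ (List.mem_cons_of_mem _ hp)
          · rw [if_neg hk] at hp
            rcases List.mem_cons.mp hp with hp | hp
            · subst hp
              rintro ⟨h, -⟩; exact hx h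
            · exact hall _ hp
      · match acc with
        | [] =>
          show (0 : Int) = if x = player then (1 : Int) else 0
          rw [if_neg hx]
        | (k, n) :: rest =>
          simp only [runStep]
          by_cases hk : k = x
          · rw [if_pos hk]
            show (0 : Int) = if x = player then n + 1 else 0
            rw [if_neg hx]
          · rw [if_neg hk]
            show (0 : Int) = if x = player then (1 : Int) else 0
            rw [if_neg hx]

-- ===== VERDICT (by name: the statement is the Claim_ definition above) =====
theorem has_winner_py_spec : Claim_equal_has_winner_py := by
  intro array player _
  unfold Spec_has_winner_py has_winner_py has_winner_py_alt
  exact go_eq_fold player array [] 0 ⟨by simp, by omega, rfl⟩
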